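-- pv_equiv track=rewrite | github.com/LogicShao/PAT-Basic-Level-Practice-Python | src/46-60/52.py | getIt
-- ===== SOURCE A (Python) =====
-- def getIt(s):
--     res = []
--     i = 0
--     while i < len(s):
--         if s[i] == '[':
--             t = ''
--             j = i + 1
--             while j < len(s) and s[j] != ']':
--                 t += s[j]
--                 j += 1
--             if j != len(s):
--                 res.append(t)
--             i = j + 1
--         else:
--             i += 1
--     return res
-- ===== SOURCE B (Python) =====
-- def getIt(s):
--     res = []
--     cur = None  # None: outside brackets; str: collected chars since last '['
--     for c in s:
--         if cur is None:
--             if c == '[':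
--                 cur = ''
--         elif c == ']':
--             res.append(cur)
--             cur = None
--         else:
--             cur += c
--     return res
-- ===== Notes on version B (the rewrite author's own statement) =====
-- stated objective: simpler
-- what changed: Replaced the nested index-walking while loops with a single pass over the characters driven by an Option state (None = outside brackets, collected string = inside), removing all index arithmetic and the inner scan.
import Mathlib
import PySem

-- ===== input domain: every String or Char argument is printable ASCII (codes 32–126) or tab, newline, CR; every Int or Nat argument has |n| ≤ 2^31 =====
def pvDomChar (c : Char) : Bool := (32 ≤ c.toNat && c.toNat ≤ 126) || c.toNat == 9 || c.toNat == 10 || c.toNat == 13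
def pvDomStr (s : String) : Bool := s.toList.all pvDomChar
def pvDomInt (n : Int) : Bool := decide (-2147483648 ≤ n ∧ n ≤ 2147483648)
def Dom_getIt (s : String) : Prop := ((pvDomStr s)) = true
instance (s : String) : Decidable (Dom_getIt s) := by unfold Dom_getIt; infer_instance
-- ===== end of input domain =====

-- B replaces A's nested index-walking loops by one fold with an Option state; objective: simpler.

-- ===== PORT A =====
-- inner while loop of A: scan from j collecting t until ']' or end; returns final (j, t)
def getItInner (cs : List Char) (j : Nat) (t : List Char) : Nat × List Char :=
  if h : j < cs.length then
    if cs[j] = ']' then (j, t)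
    else getItInner cs (j + 1) (t ++ [cs[j]])
  else (j, t)
termination_by cs.length - j

theorem getItInner_ge (cs : List Char) (j : Nat) (t : List Char) :
    j ≤ (getItInner cs j t).1 := by
  unfold getItInner
  split
  · split
    · simp
    · exact le_trans (Nat.le_succ j) (getItInner_ge cs (j + 1) _)
  · simp
termination_by cs.length - j

-- outer while loop of A
def getItOuter (cs : List Char) (i : Nat) (res : List String) : List String :=
  if h : i < cs.length then
    if cs[i] = '[' then
      let p := getItInner cs (i + 1) []
      getItOuter cs (p.1 + 1)
        (if p.1 ≠ cs.length then res ++ [String.ofList p.2] else res)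
    else getItOuter cs (i + 1) res
  else res
termination_by cs.length - i
decreasing_by
  · have := getItInner_ge cs (i + 1) []
    omega
  · omega

def getIt (s : String) : List String := getItOuter s.toList 0 []

-- ===== PORT B =====
-- one step of B's for loop: state = (res, cur)
def getItStep (st : List String × Option (List Char)) (c : Char) :
    List String × Option (List Char) :=
  match st.2 with
  | none => if c = '[' then (st.1, some []) else (st.1, none)
  | some cur => if c = ']' then (st.1 ++ [String.ofList cur], none) else (st.1, some (cur ++ [c]))

def getIt_alt (s : String) : List String :=
  (s.toList.foldl getItStep ([], none)).1

-- ===== PRECONDITION & SPEC =====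
def Spec_getIt (s : String) (out : List String) : Prop := out = getIt_alt s
instance (s : String) (out : List String) : Decidable (Spec_getIt s out) := by unfold Spec_getIt; infer_instance

-- ===== CLAIM (what is proved, stated in full; the proofs are below) =====
def Claim_equal_getIt : Prop := ∀ (s : String), Dom_getIt s → Spec_getIt s (getIt s)

-- ===== LEMMAS AND PROOFS =====

-- common reference function: mutual structural recursion over the character list
mutual
def pvSpec : List Char → List String
  | [] => []
  | c :: cs => if c = '[' then pvSpecIn cs [] else pvSpec cs

def pvSpecIn : List Char → List Char → List String
  | [], _ => []
  | c :: cs, t => if c = ']' then String.ofList t :: pvSpec cs else pvSpecIn cs (t ++ [c])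
end

-- B's fold computes pvSpec / pvSpecIn
mutual
theorem foldl_step_none (l : List Char) (res : List String) :
    (l.foldl getItStep (res, none)).1 = res ++ pvSpec l := by
  match l with
  | [] => simp [pvSpec]
  | c :: cs =>
    simp only [List.foldl, getItStep, pvSpec]
    by_cases h : c = '['
    · simp [h, foldl_step_some cs res []]
    · simp [h, foldl_step_none cs res]

theorem foldl_step_some (l : List Char) (res : List String) (cur : List Char) :
    (l.foldl getItStep (res, some cur)).1 = res ++ pvSpecIn l cur := by
  match l with
  | [] => simp [pvSpecIn]
  | c :: cs =>
    simp only [List.foldl, getItStep, pvSpecIn]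
    by_cases h : c = ']'
    · simp [h, foldl_step_none cs (res ++ [String.ofList cur])]
    · simp [h, foldl_step_some cs res (cur ++ [c])]
end

theorem getItInner_le (cs : List Char) (j : Nat) (t : List Char) (hj : j ≤ cs.length) :
    (getItInner cs j t).1 ≤ cs.length := by
  unfold getItInner
  split
  · split
    · omega
    · exact getItInner_le cs (j + 1) _ (by omega)
  · omega
termination_by cs.length - j

-- A's inner loop computes pvSpecIn of the dropped suffix
theorem inner_spec (cs : List Char) (j : Nat) (t : List Char) (hj : j ≤ cs.length) :
    pvSpecIn (cs.drop j) t =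
      if (getItInner cs j t).1 ≠ cs.length then
        String.ofList (getItInner cs j t).2 :: pvSpec (cs.drop ((getItInner cs j t).1 + 1))
      else [] := by
  unfold getItInner
  split
  · rename_i h
    rw [List.drop_eq_getElem_cons h]
    split
    · rename_i hc
      simp only [pvSpecIn, hc]
      simp
      omega
    · rename_i hc
      simp only [pvSpecIn, if_neg hc]
      exact inner_spec cs (j + 1) (t ++ [cs[j]]) (by omega)
  · rename_i h
    have : j = cs.length := by omega
    simp [this, pvSpecIn]
termination_by cs.length - j

-- A's outer loop computes pvSpec of the dropped suffix
theorem outer_spec (cs : List Char) (i : Nat) (res : List String) :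
    getItOuter cs i res = res ++ pvSpec (cs.drop i) := by
  unfold getItOuter
  split
  · rename_i h
    rw [List.drop_eq_getElem_cons h]
    split
    · rename_i hc
      simp only [pvSpec, hc]
      rw [inner_spec cs (i + 1) [] (by omega)]
      have hle := getItInner_le cs (i + 1) [] (by omega)
      rw [outer_spec cs ((getItInner cs (i + 1) []).1 + 1)]
      by_cases hne : (getItInner cs (i + 1) []).1 ≠ cs.length
      · simp [hne]
      · simp at hne
        simp [hne, List.drop_eq_nil_of_le, pvSpec]
    · rename_i hc
      simp only [pvSpec, if_neg hc]
      exact outer_spec cs (i + 1) res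
  · rename_i h
    rw [List.drop_eq_nil_of_le (by omega)]
    simp [pvSpec]
termination_by cs.length - i
decreasing_by
  · omega
  · have := getItInner_ge cs (i + 1) []
    omega

-- ===== VERDICT (by name: the statement is the Claim_ definition above) =====
theorem getIt_spec : Claim_equal_getIt := by
  intro s _
  unfold Spec_getIt getIt getIt_alt
  rw [outer_spec, foldl_step_none]
  simp
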